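-- pv_equiv track=rewrite | github.com/Kal-MrNobody/DoorNo.402 | demo/agent/agent.py | pick_article
-- ===== SOURCE A (Python) =====
-- def pick_article(articles: list, topic: str) -> dict:
--     """Pick the most relevant article for the given research topic."""
--     words = topic.lower().split()
--     scored = []
--     for a in articles:
--         text = (a.get("title", "") + " " + a.get("preview", "")).lower()
--         score = sum(1 for w in words if w in text)
--         scored.append((score, a))
--     scored.sort(key=lambda x: x[0], reverse=True)
--     return scored[0][1]
-- ===== SOURCE B (Python) =====
-- def pick_article(articles: list, topic: str) -> dict:
--     """Pick the most relevant article for the given research topic."""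
--     words = topic.lower().split()
--
--     def score(a):
--         text = (a.get("title", "") + " " + a.get("preview", "")).lower()
--         return sum(1 for w in words if w in text)
--
--     return max(articles, key=score)
-- ===== Notes on version B (the rewrite author's own statement) =====
-- stated objective: simpler
-- what changed: Replaces building a (score, article) list and stable reverse-sorting it by a single max(articles, key=score) call, which returns the first article with the maximum score without materialising or sorting the scored list; Pre_ excludes the empty article list, where A raises IndexError (and B raises ValueError).
import Mathlib
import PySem

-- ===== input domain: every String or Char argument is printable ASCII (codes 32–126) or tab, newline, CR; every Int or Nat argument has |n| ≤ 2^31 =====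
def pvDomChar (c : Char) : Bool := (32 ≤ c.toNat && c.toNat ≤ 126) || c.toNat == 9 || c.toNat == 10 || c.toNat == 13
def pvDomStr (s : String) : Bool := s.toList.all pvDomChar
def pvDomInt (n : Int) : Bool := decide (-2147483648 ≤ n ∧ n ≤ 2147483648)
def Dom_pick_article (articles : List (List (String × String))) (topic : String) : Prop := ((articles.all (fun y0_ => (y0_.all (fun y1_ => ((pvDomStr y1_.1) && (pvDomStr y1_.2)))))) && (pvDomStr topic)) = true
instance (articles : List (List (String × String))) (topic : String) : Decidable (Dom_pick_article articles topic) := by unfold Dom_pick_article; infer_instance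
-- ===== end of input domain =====

-- B replaces build-scored-list + stable reverse sort + take-head by a single max-by-key pass
-- (first article with the maximum score wins): simpler.

-- Shared per-article scoring (identical in A and B): lowercased title+" "+preview, count of
-- topic words occurring as substrings.  'title + " " + preview' is ported as join with " ".
def pvScore (words : List String) (a : List (String × String)) : Int :=
  let text := PySem.Str.lower
    (PySem.Str.join " " [PySem.Dict.getD (PySem.Dict.mk a) "title" "", PySem.Dict.getD (PySem.Dict.mk a) "preview" ""])
  ((words.map (fun w => if PySem.Str.isIn w text then (1 : Int) else 0)).sum)

-- ===== PORT A =====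
def pick_article (articles : List (List (String × String))) (topic : String) : List (String × String) :=
  let words := PySem.Str.split₀ (PySem.Str.lower topic)
  let scored := articles.foldl
    (fun acc a => acc ++ [(pvScore words a, a)]) ([] : List (Int × List (String × String)))
  let srt := PySem.List.sorted scored (fun x => x.1) true
  (PySem.List.pyGetD srt 0 ((0 : Int), [])).2

-- ===== PORT B =====
def pick_article_alt (articles : List (List (String × String))) (topic : String) : List (String × String) :=
  let words := PySem.Str.split₀ (PySem.Str.lower topic)
  match PySem.List.max? articles (fun a => pvScore words a) with
  | some a => a
  | none => []   -- unreachable inside Pre_: Python's max raises ValueError on an empty list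

-- ===== PRECONDITION & SPEC =====
-- Pre_ excludes only the empty article list, where A raises IndexError (scored[0]).
def Pre_pick_article (articles : List (List (String × String))) (topic : String) : Prop :=
  articles ≠ []
instance (articles : List (List (String × String))) (topic : String) : Decidable (Pre_pick_article articles topic) := by unfold Pre_pick_article; infer_instance
def pvWitness_pick_article : (List (List (String × String))) × String :=
  ([[("title", "AI safety"), ("preview", " notes on ai")], [("title", "cats")]], "ai safety")

def Spec_pick_article (articles : List (List (String × String))) (topic : String) (out : List (String × String)) : Prop := out = pick_article_alt articles topic
instance (articles : List (List (String × String))) (topic : String) (out : List (String × String)) : Decidable (Spec_pick_article articles topic out) := by unfold Spec_pick_article; infer_instance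

-- ===== CLAIM (what is proved, stated in full; the proofs are below) =====
def Claim_equal_pick_article : Prop := ∀ (articles : List (List (String × String))) (topic : String), Dom_pick_article articles topic → Pre_pick_article articles topic → Spec_pick_article articles topic (pick_article articles topic)

-- ===== LEMMAS AND PROOFS =====

-- the one-step max update A's sort head is shown to track, on (score, article) pairs
def pvUpd {β : Type} (best p : Int × β) : Int × β := if best.1 < p.1 then p else best

-- reverse-sort insertion order used by A (via sorted_rev_eq_foldl_insertBy)
def pvIns {β : Type} (x : Int × β) (acc : List (Int × β)) : List (Int × β) :=
  PySem.List.insertBy (fun a b => decide (b.1 < a.1)) x acc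

theorem pvIns_head {β : Type} (x y : Int × β) (ys : List (Int × β)) :
    pvIns x (y :: ys) = if y.1 < x.1 then x :: y :: ys else y :: pvIns x ys := by
  simp [pvIns, PySem.List.insertBy]

-- head of the insertion-sort fold evolves exactly as the strict-'<' best tracker
theorem pv_head_foldl {β : Type} (l : List (Int × β)) :
    ∀ (y : Int × β) (ys : List (Int × β)) (d : Int × β),
      PySem.List.pyGetD ((l.foldl (fun acc x => pvIns x acc)) (y :: ys)) 0 d
        = l.foldl pvUpd y := by
  induction l with
  | nil =>
      intro y ys d
      simp [PySem.List.pyGetD]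
  | cons x t ih =>
      intro y ys d
      beta_reduce
      rw [List.foldl_cons, List.foldl_cons, pvIns_head]
      by_cases h : y.1 < x.1
      · rw [if_pos h]
        have hx : pvUpd y x = x := by simp [pvUpd, h]
        rw [hx]
        have := ih x (y :: ys) d
        simpa using this
      · rw [if_neg h]
        have hy : pvUpd y x = y := by simp [pvUpd, h]
        rw [hy]
        have := ih y (pvIns x ys) d
        simpa using this

-- the pair fold carries (key m, m) along B's max?-style fold
theorem pv_pair_fold {β : Type} (key : β → Int) (l : List β) :
    ∀ (m : β),
      l.foldl (fun best x => pvUpd best (key x, x)) (key m, m)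
        = (key (l.foldl (fun m x => if key m < key x then x else m) m),
           l.foldl (fun m x => if key m < key x then x else m) m) := by
  induction l with
  | nil => intro m; rfl
  | cons x t ih =>
      intro m
      simp only [List.foldl_cons, pvUpd]
      by_cases h : key m < key x
      · rw [if_pos h, if_pos h]; exact ih x
      · rw [if_neg h, if_neg h]; exact ih m

-- max? on a cons is the strict-'<' running-best fold from the head
theorem pv_max?_cons {β : Type} (key : β → Int) (a : β) (t : List β) :
    PySem.List.max? (a :: t) key
      = some (t.foldl (fun m x => if key m < key x then x else m) a) := by
  show List.foldl _ (some a) t = _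
  induction t generalizing a with
  | nil => rfl
  | cons x r ih =>
      simp only [List.foldl_cons]
      by_cases h : key a < key x
      · rw [if_pos h, if_pos h]; exact ih x
      · rw [if_neg h, if_neg h]; exact ih a

theorem pick_article_spec_aux (articles : List (List (String × String))) (topic : String)
    (h : articles ≠ []) :
    pick_article articles topic = pick_article_alt articles topic := by
  cases articles with
  | nil => exact absurd rfl h
  | cons a0 rest =>
      unfold pick_article pick_article_alt
      simp only [PySem.List.foldl_append_singleton_eq_map,
        PySem.List.sorted_rev_eq_foldl_insertBy, List.nil_append,
        List.singleton_append, List.foldl_cons]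
      set words := PySem.Str.split₀ (PySem.Str.lower topic) with hw
      have hini : PySem.List.insertBy
          (fun (a b : Int × List (String × String)) => decide (b.1 < a.1))
          (pvScore words a0, a0) ([] : List (Int × List (String × String)))
          = [(pvScore words a0, a0)] := by
        simp [PySem.List.insertBy]
      rw [hini]
      have hmain := pv_head_foldl ((rest.map (fun a => (pvScore words a, a))))
        (pvScore words a0, a0) [] ((0 : Int), ([] : List (String × String)))
      simp only [pvIns] at hmain
      rw [hmain, List.foldl_map]
      have hpair := pv_pair_fold (fun a => pvScore words a) rest a0
      rw [pv_max?_cons]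
      simp only at hpair ⊢
      rw [show (fun (best : Int × List (String × String)) a =>
            pvUpd best (pvScore words a, a))
          = (fun best a => pvUpd best ((fun a => pvScore words a) a, a)) from rfl] at *
      rw [hpair]

-- ===== VERDICT (by name: the statement is the Claim_ definition above) =====
theorem pick_article_spec : Claim_equal_pick_article := by
  intro articles topic _ hpre
  exact pick_article_spec_aux articles topic hpre
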